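-- pv_equiv track=rewrite | github.com/csbrown-noaa/hierarchical_yolo | hierarchical_yolo/worms_utils.py | trim_childparent_tree
-- ===== SOURCE A (Python) =====
-- def find_closest_permitted_parent(node, tree, permitted_nodes):
--     if node not in tree:
--         return None
--     parent = tree[node]
--     while parent not in permitted_nodes:
--         if parent in tree:
--             parent = tree[parent]
--         else:
--             return None
--     return parent
--
-- def trim_childparent_tree(tree, permitted_nodes):
--     new_tree = {}
--     for node in tree:
--         closest_permitted_parent = find_closest_permitted_parent(node, tree, permitted_nodes)
--         new_tree[node] = closest_permitted_parent
--     for node in list(new_tree.keys()):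
--         if new_tree[node] is None or (node not in permitted_nodes):
--             del new_tree[node]
--     return new_tree
-- ===== SOURCE B (Python) =====
-- def trim_childparent_tree(tree, permitted_nodes):
--     permitted = set(permitted_nodes)
--     memo = {}  # node -> closest permitted strict ancestor resolution (None if none)
--     new_tree = {}
--     for node in tree:
--         path = []
--         cur = node
--         while True:
--             if cur in memo:
--                 res = memo[cur]
--                 break
--             if cur not in tree:
--                 res = None
--                 break
--             parent = tree[cur]
--             path.append(cur)
--             if parent in permitted:
--                 res = parent
--                 break
--             cur = parent
--         for x in path:
--             memo[x] = res
--         if node in permitted and res is not None: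
--             new_tree[node] = res
--     return new_tree
-- ===== Notes on version B (the rewrite author's own statement) =====
-- stated objective: alternative
-- what changed: A re-walks the ancestor chain from scratch for every node; B walks each chain once, memoizing the closest-permitted-ancestor resolution for every node on the walked path (path compression), and tests permission against a set instead of a list.
import Mathlib
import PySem

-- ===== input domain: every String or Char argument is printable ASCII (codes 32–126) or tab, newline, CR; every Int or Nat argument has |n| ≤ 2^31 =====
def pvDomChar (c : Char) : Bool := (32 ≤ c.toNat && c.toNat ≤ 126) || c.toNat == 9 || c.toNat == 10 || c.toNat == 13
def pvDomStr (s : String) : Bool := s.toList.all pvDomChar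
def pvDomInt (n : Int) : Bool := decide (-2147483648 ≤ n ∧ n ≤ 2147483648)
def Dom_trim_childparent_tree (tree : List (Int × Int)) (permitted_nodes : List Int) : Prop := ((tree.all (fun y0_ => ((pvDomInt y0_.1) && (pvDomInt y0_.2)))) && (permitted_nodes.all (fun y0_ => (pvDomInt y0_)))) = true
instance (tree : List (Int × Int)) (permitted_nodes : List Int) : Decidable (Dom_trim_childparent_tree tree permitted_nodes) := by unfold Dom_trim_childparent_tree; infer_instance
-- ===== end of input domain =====

-- B replaces A's per-node re-walk to the closest permitted ancestor by a single
-- memoized walk (path compression): each node's resolution is computed once.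
-- Equivalence is over the RETURN value on inputs where A terminates (Pre_ below).

-- ===== PORT A =====
-- the 'while parent not in permitted_nodes' loop of find_closest_permitted_parent;
-- fuel (dict size + 1) only guards totality: under Pre_ it is never exhausted
def pvWhileA (tree : PySem.Dict Int Int) (perm : List Int) : Nat → Int → Option Int
  | 0, _ => none
  | n+1, parent =>
    if parent ∈ perm then some parent
    else match tree.get? parent with
      | some q => pvWhileA tree perm n q
      | none => none

-- find_closest_permitted_parent
def pvFindA (tree : PySem.Dict Int Int) (perm : List Int) (node : Int) : Option Int :=
  match tree.get? node with
  | none => none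
  | some parent => pvWhileA tree perm (tree.size + 1) parent

def trim_childparent_tree (tree : List (Int × Int)) (permitted_nodes : List Int) : List (Int × Int) :=
  let d := PySem.Dict.ofList tree
  let newTree : PySem.Dict Int (Option Int) :=
    d.keys.foldl (fun nt node => nt.insert node (pvFindA d permitted_nodes node)) PySem.Dict.empty
  let trimmed := newTree.keys.foldl
    (fun nt node => if nt.getD node none = none ∨ node ∉ permitted_nodes then nt.erase node else nt)
    newTree
  trimmed.items.filterMap (fun p => p.2.map (fun v => (p.1, v)))

-- ===== PORT B =====
-- B's inner 'while True' walk: stops on a memo hit, a missing key, or a permitted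
-- parent; returns the resolution and the path of visited nodes (same fuel guard)
def pvWhileB (tree : PySem.Dict Int Int) (permset : PySem.Set Int)
    (memo : PySem.Dict Int (Option Int)) : Nat → Int → List Int → Option Int × List Int
  | 0, _, path => (none, path)
  | n+1, cur, path =>
    match memo.get? cur with
    | some r => (r, path)
    | none =>
      match tree.get? cur with
      | none => (none, path)
      | some parent =>
        if parent ∈ permset then (some parent, path ++ [cur])
        else pvWhileB tree permset memo n parent (path ++ [cur])

def trim_childparent_tree_alt (tree : List (Int × Int)) (permitted_nodes : List Int) : List (Int × Int) :=
  let d := PySem.Dict.ofList tree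
  let permset := PySem.Set.ofList permitted_nodes
  let st := d.keys.foldl
    (fun (st : PySem.Dict Int Int × PySem.Dict Int (Option Int)) node =>
      let rp := pvWhileB d permset st.2 (d.size + 1) node []
      let memo := rp.2.foldl (fun m x => m.insert x rp.1) st.2
      let nt := if node ∈ permset ∧ rp.1 ≠ none then st.1.insert node (rp.1.getD 0) else st.1
      (nt, memo))
    (PySem.Dict.empty, PySem.Dict.empty)
  st.1.items

-- ===== PRECONDITION & SPEC =====
-- one step up the tree (identity on nodes without a parent entry)
def pvStep (tree : List (Int × Int)) (x : Int) : Int :=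
  ((PySem.Dict.ofList tree).get? x).getD x

-- Pre_ excludes exactly the inputs on which A's while-loop never terminates:
-- every key must reach, within tree.length parent steps, a node that is permitted
-- or has no parent entry (otherwise the parent chain cycles through non-permitted
-- keys and Python A loops forever).
def Pre_trim_childparent_tree (tree : List (Int × Int)) (permitted_nodes : List Int) : Prop :=
  ∀ x ∈ (PySem.Dict.ofList tree).keys, ∃ n < tree.length + 1,
    ((pvStep tree)^[n] x ∈ permitted_nodes ∨ (PySem.Dict.ofList tree).get? ((pvStep tree)^[n] x) = none)
instance (tree : List (Int × Int)) (permitted_nodes : List Int) : Decidable (Pre_trim_childparent_tree tree permitted_nodes) := by unfold Pre_trim_childparent_tree; infer_instance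

def pvWitness_trim_childparent_tree : (List (Int × Int)) × List Int := ([(1, 2), (2, 3), (3, 4)], [1, 2, 3])

def Spec_trim_childparent_tree (tree : List (Int × Int)) (permitted_nodes : List Int) (out : List (Int × Int)) : Prop := out = trim_childparent_tree_alt tree permitted_nodes
instance (tree : List (Int × Int)) (permitted_nodes : List Int) (out : List (Int × Int)) : Decidable (Spec_trim_childparent_tree tree permitted_nodes out) := by unfold Spec_trim_childparent_tree; infer_instance

-- ===== CLAIM (what is proved, stated in full; the proofs are below) =====
def Claim_equal_trim_childparent_tree : Prop := ∀ (tree : List (Int × Int)) (permitted_nodes : List Int), Dom_trim_childparent_tree tree permitted_nodes → Pre_trim_childparent_tree tree permitted_nodes → Spec_trim_childparent_tree tree permitted_nodes (trim_childparent_tree tree permitted_nodes)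

-- ===== LEMMAS AND PROOFS =====

-- abbreviations for the proofs
def pvD (tree : List (Int × Int)) : PySem.Dict Int Int := PySem.Dict.ofList tree

def pvG (tree : List (Int × Int)) (perm : List Int) (node : Int) : Option Int :=
  pvFindA (pvD tree) perm node

def pvEscA (tree : List (Int × Int)) (perm : List Int) (y : Int) : Prop :=
  y ∈ perm ∨ (pvD tree).get? y = none

def pvStopB (tree : List (Int × Int)) (perm : List Int) (y : Int) : Prop :=
  (pvD tree).get? y = none ∨ pvStep tree y ∈ perm

def pvKeep (tree : List (Int × Int)) (perm : List Int) (node : Int) : Option (Int × Int) :=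
  match pvG tree perm node with
  | some v => if node ∈ perm then some (node, v) else none
  | none => none

def pvInv (tree : List (Int × Int)) (perm : List Int) (memo : PySem.Dict Int (Option Int)) : Prop :=
  ∀ x r, memo.get? x = some r → r = pvG tree perm x

lemma pvGet_some (tree : List (Int × Int)) (p : Int) (h : (pvD tree).get? p ≠ none) :
    (pvD tree).get? p = some (pvStep tree p) := by
  cases h' : (pvD tree).get? p with
  | none => exact absurd h' h
  | some q => simp [pvStep, pvD] at h' ⊢; simp [h']

lemma pvPeriodic (g : Int → Int) (x : Int) (i j : Nat) (hij : i < j) (heq : g^[i] x = g^[j] x) :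
    ∀ dt : Nat, ∃ s, i ≤ s ∧ s < j ∧ g^[i + dt] x = g^[s] x := by
  intro dt
  induction dt with
  | zero => exact ⟨i, le_refl i, hij, rfl⟩
  | succ dt ih =>
    obtain ⟨s, his, hsj, heqs⟩ := ih
    have hstep : g^[i + (dt + 1)] x = g^[s + 1] x := by
      rw [show i + (dt + 1) = (i + dt) + 1 by omega, Function.iterate_succ_apply' g (i + dt) x,
        Function.iterate_succ_apply' g s x, heqs]
    by_cases hs : s + 1 < j
    · exact ⟨s + 1, by omega, hs, hstep⟩
    · have hsj1 : s + 1 = j := by omega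
      refine ⟨i, le_refl i, hij, ?_⟩
      rw [hstep, hsj1, ← heq]

lemma pvBound (g : Int → Int) (E : Int → Prop) [DecidablePred E] (keys : List Int)
    (hkey : ∀ y, ¬ E y → y ∈ keys) (x : Int) (hex : ∃ m, E (g^[m] x)) :
    ∃ m ≤ keys.length, E (g^[m] x) ∧ ∀ k < m, ¬ E (g^[k] x) := by
  by_cases hm : Nat.find hex ≤ keys.length
  · exact ⟨Nat.find hex, hm, Nat.find_spec hex, fun k hk => Nat.find_min hex hk⟩
  · exfalso
    have hlen : keys.length < Nat.find hex := by omega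
    have hmaps : ∀ i : Fin (keys.length + 1), (fun i : Fin (keys.length + 1) => g^[i.1] x) i ∈ keys.toFinset := by
      intro i
      have hi : i.1 < Nat.find hex := by have := i.isLt; omega
      exact List.mem_toFinset.mpr (hkey _ (Nat.find_min hex hi))
    have hcard : keys.toFinset.card < (Finset.univ : Finset (Fin (keys.length + 1))).card := by
      have h1 := keys.toFinset_card_le
      simp only [Finset.card_univ, Fintype.card_fin]
      omega
    obtain ⟨a, -, b, -, hab, heqab⟩ :=
      Finset.exists_ne_map_eq_of_card_lt_of_maps_to hcard (fun i _ => hmaps i)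
    have key : ∀ (i j : Nat), i < j → j ≤ keys.length → g^[i] x = g^[j] x → False := by
      intro i j hij hjle heq
      obtain ⟨s, his, hsj, heqs⟩ := pvPeriodic g x i j hij heq (Nat.find hex - i)
      have hieq : i + (Nat.find hex - i) = Nat.find hex := by omega
      rw [hieq] at heqs
      have hE := Nat.find_spec hex
      rw [heqs] at hE
      exact Nat.find_min hex (by omega) hE
    rcases lt_or_gt_of_ne (fun h => hab (by exact h)) with h | h
    · exact key a.1 b.1 h (by have := b.isLt; omega) heqab
    · exact key b.1 a.1 h (by have := a.isLt; omega) heqab.symm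

lemma pvEscA_all (tree : List (Int × Int)) (perm : List Int)
    (hpre : Pre_trim_childparent_tree tree perm) (p : Int) :
    ∃ m, pvEscA tree perm ((pvStep tree)^[m] p) := by
  by_cases h : pvEscA tree perm p
  · exact ⟨0, h⟩
  · have hkey : p ∈ (PySem.Dict.ofList tree).keys := by
      rw [pvEscA, not_or] at h
      by_contra hmem
      exact h.2 ((PySem.Dict.get?_eq_none_iff_not_mem_keys _ _).mpr hmem)
    obtain ⟨n, _, hn⟩ := hpre p hkey
    exact ⟨n, hn⟩

lemma pvStopB_all (tree : List (Int × Int)) (perm : List Int)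
    (hpre : Pre_trim_childparent_tree tree perm) (p : Int) :
    ∃ m, pvStopB tree perm ((pvStep tree)^[m] p) := by
  by_contra hc
  have hno : ∀ m, ¬ pvStopB tree perm ((pvStep tree)^[m] p) := fun m hm => hc ⟨m, hm⟩
  have : ∀ m, ¬ pvEscA tree perm ((pvStep tree)^[m] (pvStep tree p)) := by
    intro m
    have h1 := hno m
    have h2 := hno (m + 1)
    rw [pvStopB, not_or] at h1 h2
    rw [pvEscA, not_or]
    have hiter : (pvStep tree)^[m] (pvStep tree p) = (pvStep tree)^[m + 1] p :=
      (Function.iterate_succ_apply (pvStep tree) m p).symm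
    constructor
    · rw [hiter]
      have := h1.2
      rwa [← Function.iterate_succ_apply' (pvStep tree) m p] at this
    · rw [hiter]
      exact h2.1
  obtain ⟨m, hm⟩ := pvEscA_all tree perm hpre (pvStep tree p)
  exact this m hm

lemma pvWalkA_stable (tree : List (Int × Int)) (perm : List Int) :
    ∀ (m : Nat) (p : Int) (n₁ n₂ : Nat), m < n₁ → m < n₂ →
      (∀ k < m, ¬ pvEscA tree perm ((pvStep tree)^[k] p)) →
      pvEscA tree perm ((pvStep tree)^[m] p) →
      pvWhileA (pvD tree) perm n₁ p = pvWhileA (pvD tree) perm n₂ p := by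
  intro m
  induction m with
  | zero =>
    intro p n₁ n₂ h1 h2 _ hE
    obtain ⟨a, rfl⟩ : ∃ a, n₁ = a + 1 := ⟨n₁ - 1, by omega⟩
    obtain ⟨b, rfl⟩ : ∃ b, n₂ = b + 1 := ⟨n₂ - 1, by omega⟩
    simp only [Function.iterate_zero, id] at hE
    by_cases hp : p ∈ perm
    · simp [pvWhileA, hp]
    · have hnone : (pvD tree).get? p = none := by
        rcases hE with hE | hE
        · exact absurd hE hp
        · exact hE
      simp [pvWhileA, hp, hnone]
  | succ m ih =>
    intro p n₁ n₂ h1 h2 hlt hE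
    obtain ⟨a, rfl⟩ : ∃ a, n₁ = a + 1 := ⟨n₁ - 1, by omega⟩
    obtain ⟨b, rfl⟩ : ∃ b, n₂ = b + 1 := ⟨n₂ - 1, by omega⟩
    have h0 := hlt 0 (Nat.succ_pos m)
    simp only [Function.iterate_zero, id] at h0
    rw [pvEscA, not_or] at h0
    have hget := pvGet_some tree p h0.2
    simp only [pvWhileA, if_neg h0.1, hget]
    refine ih (pvStep tree p) a b (by omega) (by omega) ?_ ?_
    · intro k hk
      rw [← Function.iterate_succ_apply]
      exact hlt (k + 1) (by omega)
    · rw [← Function.iterate_succ_apply]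
      exact hE

lemma pvFindA_unfold (tree : List (Int × Int)) (perm : List Int)
    (hpre : Pre_trim_childparent_tree tree perm) (p : Int) :
    pvWhileA (pvD tree) perm ((pvD tree).size + 1) p =
      if p ∈ perm then some p
      else match (pvD tree).get? p with
        | some q => pvWhileA (pvD tree) perm ((pvD tree).size + 1) q
        | none => none := by
  haveI : DecidablePred (pvEscA tree perm) := fun y => by unfold pvEscA; infer_instance
  have hkey : ∀ y, ¬ pvEscA tree perm y → y ∈ (pvD tree).keys := by
    intro y hy
    rw [pvEscA, not_or] at hy
    by_contra hmem
    exact hy.2 ((PySem.Dict.get?_eq_none_iff_not_mem_keys _ _).mpr hmem)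
  obtain ⟨m, hmle, hE, hmin⟩ :=
    pvBound (pvStep tree) (pvEscA tree perm) (pvD tree).keys hkey p (pvEscA_all tree perm hpre p)
  have hsize : (pvD tree).keys.length = (pvD tree).size := by
    simp [PySem.Dict.keys, PySem.Dict.size]
  by_cases hp : p ∈ perm
  · simp [pvWhileA, hp]
  · cases hq : (pvD tree).get? p with
    | none => simp [pvWhileA, hp, hq]
    | some q =>
      have hnE : ¬ pvEscA tree perm p := by
        rw [pvEscA, not_or]
        exact ⟨hp, by simp [hq]⟩
      have hm1 : m ≠ 0 := by
        intro h; rw [h] at hE; simp only [Function.iterate_zero, id] at hE; exact hnE hE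
      have hmemp : p ∈ (pvD tree).keys := hkey p hnE
      have hpos : 0 < (pvD tree).size := by
        rw [← hsize]; exact List.length_pos_of_mem hmemp
      have hstepq : pvStep tree p = q := by simp [pvStep, pvD] at hq ⊢; simp [hq]
      simp only [pvWhileA, if_neg hp, hq]
      rw [hsize] at hmle
      refine pvWalkA_stable tree perm (m - 1) q ((pvD tree).size) ((pvD tree).size + 1)
        (by omega) (by omega) ?_ ?_
      · intro k hk
        rw [← hstepq, ← Function.iterate_succ_apply]
        exact hmin (k + 1) (by omega)
      · rw [← hstepq, ← Function.iterate_succ_apply,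
          show (m - 1).succ = m by omega]
        exact hE

lemma pvWalkA_eq_G (tree : List (Int × Int)) (perm : List Int)
    (hpre : Pre_trim_childparent_tree tree perm) (p : Int) (hp : p ∉ perm) :
    pvWhileA (pvD tree) perm ((pvD tree).size + 1) p = pvG tree perm p := by
  rw [pvFindA_unfold tree perm hpre p, if_neg hp]
  rw [pvG, pvFindA]
  cases hq : (pvD tree).get? p <;> simp

lemma pvWhileB_spec (tree : List (Int × Int)) (perm : List Int)
    (hpre : Pre_trim_childparent_tree tree perm) (memo : PySem.Dict Int (Option Int))
    (hinv : pvInv tree perm memo) :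
    ∀ (m : Nat) (cur : Int) (n : Nat) (path : List Int), m < n →
      (∀ k < m, ¬ pvStopB tree perm ((pvStep tree)^[k] cur)) →
      pvStopB tree perm ((pvStep tree)^[m] cur) →
      ∃ ext, pvWhileB (pvD tree) (PySem.Set.ofList perm) memo n cur path =
          (pvG tree perm cur, path ++ ext) ∧ ∀ x ∈ ext, pvG tree perm x = pvG tree perm cur := by
  intro m
  induction m with
  | zero =>
    intro cur n path hn hmin hstop
    obtain ⟨a, rfl⟩ : ∃ a, n = a + 1 := ⟨n - 1, by omega⟩
    simp only [pvWhileB]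
    cases hmemo : memo.get? cur with
    | some r =>
      dsimp only
      refine ⟨[], ?_, by simp⟩
      rw [hinv cur r hmemo]; simp
    | none =>
      cases hq : (pvD tree).get? cur with
      | none => exact ⟨[], by simp [pvG, pvFindA, hq], by simp⟩
      | some parent =>
        dsimp only
        have hstepc : pvStep tree cur = parent := by
          rw [pvStep]
          simp only [pvD] at hq
          rw [hq]; rfl
        by_cases hperm : parent ∈ perm
        · rw [if_pos ((PySem.Set.mem_ofList _ _).mpr hperm)]
          have hG : pvG tree perm cur = some parent := by
            simp only [pvG, pvFindA, hq, pvWhileA, if_pos hperm]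
          refine ⟨[cur], by simp [hG], ?_⟩
          intro x hx
          simp only [List.mem_singleton] at hx
          rw [hx]
        · exfalso
          simp only [Function.iterate_zero, id, pvStopB, hstepc] at hstop
          rcases hstop with hstop | hstop
          · rw [hq] at hstop; exact absurd hstop (by simp)
          · exact hperm hstop
  | succ m ih =>
    intro cur n path hn hmin hstop
    obtain ⟨a, rfl⟩ : ∃ a, n = a + 1 := ⟨n - 1, by omega⟩
    simp only [pvWhileB]
    cases hmemo : memo.get? cur with
    | some r =>
      dsimp only
      refine ⟨[], ?_, by simp⟩
      rw [hinv cur r hmemo]; simp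
    | none =>
      cases hq : (pvD tree).get? cur with
      | none => exact ⟨[], by simp [pvG, pvFindA, hq], by simp⟩
      | some parent =>
        dsimp only
        have hstepc : pvStep tree cur = parent := by
          rw [pvStep]
          simp only [pvD] at hq
          rw [hq]; rfl
        by_cases hperm : parent ∈ perm
        · rw [if_pos ((PySem.Set.mem_ofList _ _).mpr hperm)]
          have hG : pvG tree perm cur = some parent := by
            simp only [pvG, pvFindA, hq, pvWhileA, if_pos hperm]
          refine ⟨[cur], by simp [hG], ?_⟩
          intro x hx
          simp only [List.mem_singleton] at hx
          rw [hx]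
        · rw [if_neg (fun hmem => hperm ((PySem.Set.mem_ofList _ _).mp hmem))]
          have hGcur : pvG tree perm cur = pvG tree perm parent := by
            have h1 : pvG tree perm cur = pvWhileA (pvD tree) perm ((pvD tree).size + 1) parent := by
              simp only [pvG, pvFindA, hq]
            rw [h1, pvWalkA_eq_G tree perm hpre parent hperm]
          obtain ⟨ext, heq, hall⟩ := ih parent a (path ++ [cur]) (by omega)
            (by
              intro k hk
              rw [← hstepc, ← Function.iterate_succ_apply]
              exact hmin (k + 1) (by omega))
            (by
              rw [← hstepc, ← Function.iterate_succ_apply]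
              exact hstop)
          refine ⟨cur :: ext, ?_, ?_⟩
          · rw [heq, hGcur]
            simp
          · intro x hx
            rcases List.mem_cons.mp hx with hx | hx
            · rw [hx]
            · rw [hall x hx, hGcur]

lemma pvWhileB_run (tree : List (Int × Int)) (perm : List Int)
    (hpre : Pre_trim_childparent_tree tree perm) (memo : PySem.Dict Int (Option Int))
    (hinv : pvInv tree perm memo) (node : Int) :
    ∃ ext, pvWhileB (pvD tree) (PySem.Set.ofList perm) memo ((pvD tree).size + 1) node [] =
        (pvG tree perm node, ext) ∧ ∀ x ∈ ext, pvG tree perm x = pvG tree perm node := by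
  haveI : DecidablePred (pvStopB tree perm) := fun y => by unfold pvStopB; infer_instance
  have hkey : ∀ y, ¬ pvStopB tree perm y → y ∈ (pvD tree).keys := by
    intro y hy
    rw [pvStopB, not_or] at hy
    by_contra hmem
    exact hy.1 ((PySem.Dict.get?_eq_none_iff_not_mem_keys _ _).mpr hmem)
  obtain ⟨m, hmle, hE, hmin⟩ :=
    pvBound (pvStep tree) (pvStopB tree perm) (pvD tree).keys hkey node (pvStopB_all tree perm hpre node)
  have hsize : (pvD tree).keys.length = (pvD tree).size := by
    simp [PySem.Dict.keys, PySem.Dict.size]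
  obtain ⟨ext, heq, hall⟩ := pvWhileB_spec tree perm hpre memo hinv m node ((pvD tree).size + 1) []
    (by omega) hmin hE
  exact ⟨ext, by simpa using heq, hall⟩

lemma pvInv_preserve (tree : List (Int × Int)) (perm : List Int) (res : Option Int) :
    ∀ (ext : List Int) (memo : PySem.Dict Int (Option Int)), pvInv tree perm memo →
      (∀ x ∈ ext, pvG tree perm x = res) →
      pvInv tree perm (ext.foldl (fun m x => m.insert x res) memo) := by
  intro ext
  induction ext with
  | nil => intro memo h _; exact h
  | cons a ext ih =>
    intro memo hinv hall
    simp only [List.foldl_cons]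
    refine ih _ ?_ (fun x hx => hall x (List.mem_cons_of_mem _ hx))
    intro x r hx
    rw [PySem.Dict.get?_insert] at hx
    by_cases hxa : x = a
    · simp [hxa] at hx
      rw [← hx, hxa]
      exact (hall a (List.mem_cons_self)).symm
    · exact hinv x r (by simpa [hxa] using hx)

lemma pvOuterB_spec (tree : List (Int × Int)) (perm : List Int)
    (hpre : Pre_trim_childparent_tree tree perm) :
    ∀ (l : List Int) (nt : PySem.Dict Int Int) (memo : PySem.Dict Int (Option Int)),
      l.Nodup → (∀ x ∈ l, nt.contains x = false) → pvInv tree perm memo →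
      (l.foldl
        (fun (st : PySem.Dict Int Int × PySem.Dict Int (Option Int)) node =>
          let rp := pvWhileB (pvD tree) (PySem.Set.ofList perm) st.2 ((pvD tree).size + 1) node []
          let memo := rp.2.foldl (fun m x => m.insert x rp.1) st.2
          let nt := if node ∈ PySem.Set.ofList perm ∧ rp.1 ≠ none then st.1.insert node (rp.1.getD 0) else st.1
          (nt, memo)) (nt, memo)).1.items
      = nt.items ++ l.filterMap (pvKeep tree perm) := by
  intro l
  induction l with
  | nil => intro nt memo _ _ _; simp
  | cons node l ih =>
    intro nt memo hnd hfr hinv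
    obtain ⟨hnode, hndl⟩ := List.nodup_cons.mp hnd
    obtain ⟨ext, heq, hall⟩ := pvWhileB_run tree perm hpre memo hinv node
    rw [List.foldl_cons]
    dsimp only
    rw [heq]
    dsimp only
    have hinv' : pvInv tree perm (ext.foldl (fun m x => m.insert x (pvG tree perm node)) memo) :=
      pvInv_preserve tree perm (pvG tree perm node) ext memo hinv hall
    by_cases hkeep : node ∈ PySem.Set.ofList perm ∧ pvG tree perm node ≠ none
    · rw [if_pos hkeep]
      obtain ⟨v, hv⟩ := Option.ne_none_iff_exists'.mp hkeep.2
      have hfresh : nt.contains node = false := hfr node List.mem_cons_self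
      have hfr' : ∀ x ∈ l, (nt.insert node ((pvG tree perm node).getD 0)).contains x = false := by
        intro x hx
        rw [PySem.Dict.contains_insert]
        have hxn : x ≠ node := fun h => hnode (h ▸ hx)
        simp [hxn, hfr x (List.mem_cons_of_mem _ hx)]
      rw [ih _ _ hndl hfr' hinv',
        PySem.Dict.items_insert_of_not_contains nt _ hfresh]
      have hkeepn : pvKeep tree perm node = some (node, v) := by
        simp [pvKeep, hv, (PySem.Set.mem_ofList _ _).mp hkeep.1]
      rw [List.filterMap_cons_some (f := pvKeep tree perm) (b := (node, v)) hkeepn, hv]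
      simp
    · rw [if_neg hkeep]
      rw [ih _ _ hndl (fun x hx => hfr x (List.mem_cons_of_mem _ hx)) hinv']
      have hkeepn : pvKeep tree perm node = none := by
        rcases not_and_or.mp hkeep with h | h
        · cases hv : pvG tree perm node with
          | none => simp [pvKeep, hv]
          | some v =>
            have : node ∉ perm := fun hm => h ((PySem.Set.mem_ofList _ _).mpr hm)
            simp [pvKeep, hv, this]
        · have hv : pvG tree perm node = none := not_not.mp h
          simp [pvKeep, hv]
      rw [List.filterMap_cons_none hkeepn]

lemma pvB_eq (tree : List (Int × Int)) (perm : List Int)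
    (hpre : Pre_trim_childparent_tree tree perm) :
    trim_childparent_tree_alt tree perm = (pvD tree).keys.filterMap (pvKeep tree perm) := by
  unfold trim_childparent_tree_alt
  simp only []
  have hD : PySem.Dict.ofList tree = pvD tree := rfl
  rw [hD]
  have := pvOuterB_spec tree perm hpre (pvD tree).keys PySem.Dict.empty PySem.Dict.empty
    (PySem.Dict.nodup_keys_ofList tree)
    (by intro x _; exact PySem.Dict.contains_empty x)
    (by intro x r h; rw [PySem.Dict.get?_empty] at h; exact absurd h (by simp))
  rw [this]
  simp [PySem.Dict.empty]

lemma pvGet_erase_ne (m : PySem.Dict Int (Option Int)) (a x : Int) (h : x ≠ a) :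
    (m.erase a).get? x = m.get? x := by
  rcases m with ⟨items⟩
  simp only [PySem.Dict.erase, PySem.Dict.get?]
  induction items with
  | nil => rfl
  | cons p rest ih =>
    by_cases hpa : p.1 = a
    · rw [List.filter_cons, if_neg (by simp [hpa]),
        List.find?_cons_of_neg (by simp [hpa, Ne.symm h])]
      exact ih
    · rw [List.filter_cons, if_pos (by simp [hpa])]
      by_cases hpx : p.1 = x
      · rw [List.find?_cons_of_pos (by simp [hpx]), List.find?_cons_of_pos (by simp [hpx])]
      · rw [List.find?_cons_of_neg (by simp [hpx]), List.find?_cons_of_neg (by simp [hpx])]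
        exact ih

lemma pvEraseFold (tree : List (Int × Int)) (perm : List Int) :
    ∀ (l : List Int) (nt : PySem.Dict Int (Option Int)), l.Nodup →
      (∀ x ∈ l, nt.get? x = some (pvG tree perm x)) →
      (l.foldl (fun nt node => if nt.getD node none = none ∨ node ∉ perm then nt.erase node else nt) nt).items
      = nt.items.filter (fun p => !decide (p.1 ∈ l ∧ (pvG tree perm p.1 = none ∨ p.1 ∉ perm))) := by
  intro l
  induction l with
  | nil => intro nt _ _; simp
  | cons a l ih =>
    intro nt hnd h
    obtain ⟨hal, hndl⟩ := List.nodup_cons.mp hnd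
    have hga : nt.getD a none = pvG tree perm a := by
      rw [PySem.Dict.getD_eq_get?_getD, h a List.mem_cons_self]; rfl
    rw [List.foldl_cons]
    by_cases hC : pvG tree perm a = none ∨ a ∉ perm
    · rw [if_pos (by rw [hga]; exact hC)]
      have h' : ∀ x ∈ l, (nt.erase a).get? x = some (pvG tree perm x) := by
        intro x hx
        rw [pvGet_erase_ne nt a x (fun hxa => hal (hxa ▸ hx))]
        exact h x (List.mem_cons_of_mem _ hx)
      rw [ih _ hndl h']
      have herase : (nt.erase a).items = nt.items.filter (fun p => !(p.1 == a)) := rfl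
      rw [herase, List.filter_filter]
      apply List.filter_congr
      intro p _
      by_cases hpa : p.1 = a
      · simp [hpa, hC]
      · simp [hpa, List.mem_cons]
    · rw [if_neg (by rw [hga]; exact hC)]
      rw [ih _ hndl (fun x hx => h x (List.mem_cons_of_mem _ hx))]
      apply List.filter_congr
      intro p _
      by_cases hpa : p.1 = a
      · simp [hpa, hal, hC]
      · simp [hpa, List.mem_cons]

lemma pvKeysKeep (tree : List (Int × Int)) (perm : List Int) :
    ∀ (l : List Int),
      ((l.map (fun k => (k, pvG tree perm k))).filter
          (fun p => !decide (pvG tree perm p.1 = none ∨ p.1 ∉ perm))).filterMap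
        (fun p => p.2.map (fun v => (p.1, v)))
      = l.filterMap (pvKeep tree perm) := by
  intro l
  induction l with
  | nil => rfl
  | cons k l ih =>
    rw [List.map_cons, List.filter_cons]
    by_cases hc : pvG tree perm k = none ∨ k ∉ perm
    · have hkeep : pvKeep tree perm k = none := by
        rcases hc with hc | hc
        · simp [pvKeep, hc]
        · cases hv : pvG tree perm k with
          | none => simp [pvKeep, hv]
          | some v => simp [pvKeep, hv, hc]
      have hcond : (!decide (pvG tree perm (k, pvG tree perm k).1 = none ∨ (k, pvG tree perm k).1 ∉ perm)) = false := by
        rw [decide_eq_true hc]; rfl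
      rw [hcond, if_neg Bool.false_ne_true, ih, List.filterMap_cons_none hkeep]
    · have h1 : pvG tree perm k ≠ none := fun h => hc (Or.inl h)
      have h2 : k ∈ perm := by by_contra h; exact hc (Or.inr h)
      obtain ⟨v, hv⟩ := Option.ne_none_iff_exists'.mp h1
      have hcond : (!decide (pvG tree perm (k, pvG tree perm k).1 = none ∨ (k, pvG tree perm k).1 ∉ perm)) = true := by
        rw [decide_eq_false hc]; rfl
      rw [hcond, if_pos rfl,
        List.filterMap_cons_some (f := fun p : Int × Option Int => p.2.map (fun v => (p.1, v)))
          (b := (k, v)) (by simp [hv]),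
        List.filterMap_cons_some (f := pvKeep tree perm) (b := (k, v))
          (by simp [pvKeep, hv, h2]), ih]

lemma pvA_eq (tree : List (Int × Int)) (perm : List Int) :
    trim_childparent_tree tree perm = (pvD tree).keys.filterMap (pvKeep tree perm) := by
  unfold trim_childparent_tree
  simp only []
  have hD : PySem.Dict.ofList tree = pvD tree := rfl
  rw [hD]
  set nt0 := (pvD tree).keys.foldl
    (fun nt node => nt.insert node (pvFindA (pvD tree) perm node)) PySem.Dict.empty with hnt0
  have hitems : nt0.items = (pvD tree).keys.map (fun k => (k, pvG tree perm k)) := by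
    rw [hnt0]
    have := PySem.Dict.items_foldl_insert_fresh ((pvD tree).keys) (fun a => a)
      (fun a => pvFindA (pvD tree) perm a) PySem.Dict.empty
      (by intro a _; exact PySem.Dict.contains_empty a)
      (by rw [List.map_id']; exact PySem.Dict.nodup_keys_ofList tree)
    simpa [pvG] using this
  have hkeys : nt0.keys = (pvD tree).keys := by
    rw [show nt0.keys = nt0.items.map (fun p => p.1) from rfl, hitems, List.map_map,
      show ((fun p : Int × Option Int => p.1) ∘ fun k => (k, pvG tree perm k)) = fun k => k from rfl,
      List.map_id']
  have hndnt0 : nt0.keys.Nodup := by rw [hkeys]; exact PySem.Dict.nodup_keys_ofList tree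
  have hget : ∀ x ∈ nt0.keys, nt0.get? x = some (pvG tree perm x) := by
    intro x hx
    refine PySem.Dict.get?_of_mem_items nt0 ?_ hndnt0
    rw [hitems]
    rw [hkeys] at hx
    exact List.mem_map.mpr ⟨x, hx, rfl⟩
  rw [pvEraseFold tree perm nt0.keys nt0 hndnt0 hget]
  have hfc : nt0.items.filter
      (fun p => !decide (p.1 ∈ nt0.keys ∧ (pvG tree perm p.1 = none ∨ p.1 ∉ perm)))
      = nt0.items.filter (fun p => !decide (pvG tree perm p.1 = none ∨ p.1 ∉ perm)) := by
    apply List.filter_congr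
    intro p hp
    have hmem : p.1 ∈ nt0.keys := List.mem_map.mpr ⟨p, hp, rfl⟩
    simp [hmem]
  rw [hfc, hitems]
  exact pvKeysKeep tree perm ((pvD tree).keys)


-- ===== VERDICT (by name: the statement is the Claim_ definition above) =====
theorem trim_childparent_tree_spec : Claim_equal_trim_childparent_tree := by
  intro tree perm _ hpre
  unfold Spec_trim_childparent_tree
  rw [pvA_eq tree perm, pvB_eq tree perm hpre]
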